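-- pv_equiv track=rewrite | github.com/Salome2010/IntroProgramacion | repaso.py | ultimos3
-- ===== SOURCE A (Python) =====
-- def ultimos3(numero:int) -> int:
--     lista = list(str(numero))
--     numero:int = ''
--     while len(lista)>3:
--         lista.pop(0)
--     for i in range(len(lista)):
--         numero+=lista[i]
--     return numero
-- ===== SOURCE B (Python) =====
-- def ultimos3(numero: int) -> str:
--     return str(numero)[-3:]
-- ===== Notes on version B (the rewrite author's own statement) =====
-- stated objective: simpler
-- what changed: Replaces the pop-front erode loop plus character-by-character rebuild with a single negative slice str(numero)[-3:] on the decimal string.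
import Mathlib
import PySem

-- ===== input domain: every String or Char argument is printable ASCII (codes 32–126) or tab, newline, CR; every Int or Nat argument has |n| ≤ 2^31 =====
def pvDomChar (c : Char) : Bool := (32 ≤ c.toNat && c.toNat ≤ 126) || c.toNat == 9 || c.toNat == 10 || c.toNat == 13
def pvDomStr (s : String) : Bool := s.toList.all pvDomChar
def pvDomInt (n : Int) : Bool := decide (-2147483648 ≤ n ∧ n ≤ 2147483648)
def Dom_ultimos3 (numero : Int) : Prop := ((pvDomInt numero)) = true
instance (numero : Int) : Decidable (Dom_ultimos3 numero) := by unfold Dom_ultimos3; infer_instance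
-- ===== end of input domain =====

-- B replaces A's pop-front erode loop and char-by-char rebuild with one negative slice of the decimal string (simpler).


-- ===== PORT A =====
-- while len(lista) > 3: lista.pop(0)
def ultimos3Loop (lista : List Char) : List Char :=
  if lista.length > 3 then ultimos3Loop lista.tail else lista
termination_by lista.length
decreasing_by simp_all [List.length_tail]; omega

def ultimos3 (numero : Int) : String :=
  let lista := (PySem.Int.toStr numero).toList
  let lista := ultimos3Loop lista
  -- for i in range(len(lista)): numero += lista[i]   (index always in range, so pyGetD is exact)
  (PySem.List.pyRange 0 lista.length 1).foldl
    (fun acc j => acc.push (PySem.List.pyGetD lista j ' ')) ""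

-- ===== PORT B =====
def ultimos3_alt (numero : Int) : String :=
  PySem.Str.slice (PySem.Int.toStr numero) (some (-3)) none

-- ===== PRECONDITION & SPEC =====
def Spec_ultimos3 (numero : Int) (out : String) : Prop := out = ultimos3_alt numero
instance (numero : Int) (out : String) : Decidable (Spec_ultimos3 numero out) := by unfold Spec_ultimos3; infer_instance

-- ===== CLAIM (what is proved, stated in full; the proofs are below) =====
def Claim_equal_ultimos3 : Prop := ∀ (numero : Int), Dom_ultimos3 numero → Spec_ultimos3 numero (ultimos3 numero)

-- ===== LEMMAS AND PROOFS =====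

-- the erode loop drops everything but the last three characters
theorem ultimos3Loop_eq_drop (l : List Char) : ultimos3Loop l = l.drop (l.length - 3) := by
  induction l using ultimos3Loop.induct with
  | case1 l h ih =>
      rw [ultimos3Loop, if_pos h, ih]
      cases l with
      | nil => simp at h
      | cons a t =>
          simp only [List.tail_cons, List.length_cons]
          have h3 : t.length + 1 - 3 = (t.length - 3) + 1 := by simp at h; omega
          rw [h3, List.drop_succ_cons]
  | case2 l h =>
      rw [ultimos3Loop, if_neg h]
      have : l.length - 3 = 0 := by omega
      simp [this]

theorem toList_foldl_push (l : List Char) (s : String) :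
    (l.foldl (fun acc c => acc.push c) s).toList = s.toList ++ l := by
  induction l generalizing s with
  | nil => simp
  | cons c t ih => simp [List.foldl, ih]

-- ===== VERDICT (by name: the statement is the Claim_ definition above) =====
theorem ultimos3_spec : Claim_equal_ultimos3 := by
  intro numero _
  unfold Spec_ultimos3 ultimos3 ultimos3_alt
  apply String.toList_inj.mp
  rw [PySem.List.foldl_pyRange_zero_pyGetD' ((ultimos3Loop (PySem.Int.toStr numero).toList)) ' '
        (fun acc c => acc.push c) "", ultimos3Loop_eq_drop, toList_foldl_push]
  simp
  rw [PySem.List.slice_from_neg_ofNat (PySem.Int.toChars numero) 3 (by omega)]
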